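-- pv_equiv track=rewrite | github.com/alekos-bigo/aisd-labs | lab7/2.py | hash_text
-- ===== SOURCE A (Python) =====
-- def hash_text(words: list, alphabet: list):
--     hashed_words = []
--     alphabet_len = len(alphabet)
--     for idx in range(0, len(words) - 2):
--         hashed_words.append(alphabet.index(words[idx]) * alphabet_len ** 2 +
--                             alphabet.index(words[idx + 1]) * alphabet_len +
--                             alphabet.index(words[idx + 2]))
--     return hashed_words
-- ===== SOURCE B (Python) =====
-- def hash_text(words: list, alphabet: list):
--     n = len(words)
--     if n < 3:
--         return []
--     pos = {}
--     for i, w in enumerate(alphabet):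
--         if w not in pos:
--             pos[w] = i
--     ids = [pos[w] for w in words]
--     L = len(alphabet)
--     L2 = L * L
--     h = ids[0] * L2 + ids[1] * L + ids[2]
--     hashes = [h]
--     for i in range(3, n):
--         h = (h - ids[i - 3] * L2) * L + ids[i]
--         hashes.append(h)
--     return hashes
-- ===== Notes on version B (the rewrite author's own statement) =====
-- stated objective: alternative
-- what changed: B builds a first-occurrence index dict over the alphabet once and maintains a rolling window hash (subtract the outgoing index, shift by the alphabet length, add the incoming one), replacing A's three independent alphabet.index scans per window.
import Mathlib
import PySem

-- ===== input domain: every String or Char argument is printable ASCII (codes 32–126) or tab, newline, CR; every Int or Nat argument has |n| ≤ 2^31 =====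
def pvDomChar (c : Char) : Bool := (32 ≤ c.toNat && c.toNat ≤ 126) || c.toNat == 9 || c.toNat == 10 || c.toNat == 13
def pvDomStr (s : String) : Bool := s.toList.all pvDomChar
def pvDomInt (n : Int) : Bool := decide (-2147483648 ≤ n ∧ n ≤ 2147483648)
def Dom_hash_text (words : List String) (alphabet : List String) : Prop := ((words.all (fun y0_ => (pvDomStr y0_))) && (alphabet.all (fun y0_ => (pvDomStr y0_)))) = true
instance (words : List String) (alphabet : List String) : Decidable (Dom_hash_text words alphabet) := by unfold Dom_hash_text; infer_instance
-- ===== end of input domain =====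

-- B caches each word's first-occurrence alphabet index in a dict built once and keeps a rolling window hash, replacing A's three independent alphabet.index scans per window (alternative algorithm).


-- ===== PORT A =====
-- alphabet.index(w) as an Int; the default 0 is never reached inside Pre_ (Python raises ValueError there)
def pvIdx (alphabet : List String) (w : String) : Int :=
  ((PySem.List.index? alphabet w).getD 0 : Nat)

def hash_text (words : List String) (alphabet : List String) : List Int :=
  let alphabet_len : Int := alphabet.length
  (PySem.List.pyRange 0 ((words.length : Int) - 2) 1).foldl
    (fun hashed_words idx =>
      hashed_words ++
        [pvIdx alphabet ((PySem.List.pyGet? words idx).getD "") * alphabet_len ^ 2 +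
         pvIdx alphabet ((PySem.List.pyGet? words (idx + 1)).getD "") * alphabet_len +
         pvIdx alphabet ((PySem.List.pyGet? words (idx + 2)).getD "")]) []

-- ===== PORT B =====
-- the first-occurrence position dict: for i, w in enumerate(alphabet): if w not in pos: pos[w] = i
def pvPos (alphabet : List String) : PySem.Dict String Int :=
  (PySem.List.enumerate alphabet 0).foldl
    (fun (d : PySem.Dict String Int) p =>
      if d.contains p.2 = false then d.insert p.2 p.1 else d) PySem.Dict.empty

def hash_text_alt (words : List String) (alphabet : List String) : List Int :=
  if words.length < 3 then []
  else
    -- ids = [pos[w] for w in words]; the default 0 is never reached inside Pre_ (Python raises KeyError there)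
    let ids := words.map (fun w => ((pvPos alphabet).get? w).getD 0)
    let L : Int := alphabet.length
    let L2 := L * L
    let h0 := (PySem.List.pyGet? ids 0).getD 0 * L2 +
              (PySem.List.pyGet? ids 1).getD 0 * L +
              (PySem.List.pyGet? ids 2).getD 0
    let st :=
      (PySem.List.pyRange 3 (words.length : Int) 1).foldl
        (fun (st : Int × List Int) i =>
          let h := (st.1 - (PySem.List.pyGet? ids (i - 3)).getD 0 * L2) * L +
                   (PySem.List.pyGet? ids i).getD 0
          (h, st.2 ++ [h])) (h0, [h0])
    st.2

-- ===== PRECONDITION & SPEC =====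
-- Pre_ excludes exactly the inputs on which Python A raises ValueError: three or more words
-- with some word absent from the alphabet (every word is looked up there).
def Pre_hash_text (words : List String) (alphabet : List String) : Prop :=
  words.length < 3 ∨ ∀ w ∈ words, w ∈ alphabet
instance (words : List String) (alphabet : List String) : Decidable (Pre_hash_text words alphabet) := by unfold Pre_hash_text; infer_instance
def pvWitness_hash_text : List String × List String := (["a", "b", "a", "b"], ["a", "b"])

def Spec_hash_text (words : List String) (alphabet : List String) (out : List Int) : Prop := out = hash_text_alt words alphabet
instance (words : List String) (alphabet : List String) (out : List Int) : Decidable (Spec_hash_text words alphabet out) := by unfold Spec_hash_text; infer_instance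

-- ===== CLAIM (what is proved, stated in full; the proofs are below) =====
def Claim_equal_hash_text : Prop := ∀ (words : List String) (alphabet : List String), Dom_hash_text words alphabet → Pre_hash_text words alphabet → Spec_hash_text words alphabet (hash_text words alphabet)

-- ===== LEMMAS AND PROOFS =====

-- index (as Int) of words[k] in alphabet, total
def gIdx (words alphabet : List String) (k : Nat) : Int :=
  pvIdx alphabet ((PySem.List.pyGet? words (k : Int)).getD "")

-- the hash of window k
def winH (words alphabet : List String) (k : Nat) : Int :=
  gIdx words alphabet k * (alphabet.length : Int) ^ 2 +
  gIdx words alphabet (k + 1) * (alphabet.length : Int) +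
  gIdx words alphabet (k + 2)

theorem foldl_app_singleton {α β : Type} (E : α → β) :
    ∀ (l : List α) (acc : List β),
      l.foldl (fun a i => a ++ [E i]) acc = acc ++ l.map E := by
  intro l
  induction l with
  | nil => intro acc; simp
  | cons x xs ih => intro acc; simp [List.foldl, ih]

theorem hash_text_eq_map (words alphabet : List String) :
    hash_text words alphabet =
      (List.range (words.length - 2)).map (winH words alphabet) := by
  unfold hash_text
  rw [PySem.List.pyRange_one, foldl_app_singleton]
  simp only [List.nil_append, List.map_map]
  have hn : (((words.length : Int) - 2) - 0).toNat = words.length - 2 := by omega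
  rw [hn]
  apply List.map_congr_left
  intro k _
  simp only [Function.comp, winH, gIdx]
  norm_num

-- the first-occurrence dict fold, fully general
theorem posFold_get? :
    ∀ (l : List String) (s : Int) (d : PySem.Dict String Int) (w : String),
      ((PySem.List.enumerate l s).foldl
          (fun (d : PySem.Dict String Int) p =>
            if d.contains p.2 = false then d.insert p.2 p.1 else d) d).get? w
        = if d.contains w = true then d.get? w
          else (PySem.List.index? l w).map (fun n : Nat => s + (n : Int)) := by
  intro l
  induction l with
  | nil =>
      intro s d w
      simp only [PySem.List.enumerate_nil, List.foldl_nil]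
      by_cases h : d.contains w = true
      · rw [if_pos h]
      · rw [if_neg h]
        have hn : d.get? w = none := by
          rw [PySem.Dict.get?_eq_none_iff_not_mem_keys]
          intro hmem
          exact h ((PySem.Dict.contains_iff_mem_keys d w).mpr hmem)
        have hi : PySem.List.index? ([] : List String) w = none := by
          rw [PySem.List.index?_eq_none_iff]
          simp
        rw [hn, hi]
        rfl
  | cons x xs ih =>
      intro s d w
      rw [PySem.List.enumerate_cons]
      simp only [List.foldl_cons]
      cases hx : d.contains x with
      | true =>
          rw [if_neg (by simp), ih]
          by_cases hw : d.contains w = true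
          · rw [if_pos hw, if_pos hw]
          · rw [if_neg hw, if_neg hw]
            have hwx : x ≠ w := fun e => hw (e ▸ hx)
            rw [PySem.List.index?_cons_of_ne xs hwx, Option.map_map]
            congr 1
            funext n
            simp only [Function.comp_apply]
            push_cast
            ring
      | false =>
          rw [if_pos rfl, ih]
          by_cases hwx : w = x
          · subst hwx
            rw [if_pos (by simp [PySem.Dict.contains_insert_self]),
                PySem.Dict.get?_insert_self,
                if_neg (fun hcc => Bool.noConfusion (hcc ▸ hx)),
                PySem.List.index?_cons_self]
            simp
          · have hc : (d.insert x s).contains w = d.contains w := by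
              rw [PySem.Dict.contains_insert]
              simp [hwx]
            rw [hc]
            by_cases hw : d.contains w = true
            · rw [if_pos hw, if_pos hw, PySem.Dict.get?_insert, if_neg hwx]
            · rw [if_neg hw, if_neg hw]
              have hxw : x ≠ w := fun e => hwx e.symm
              rw [PySem.List.index?_cons_of_ne xs hxw, Option.map_map]
              congr 1
              funext n
              simp only [Function.comp_apply]
              push_cast
              ring

theorem pvPos_getD (alphabet : List String) (w : String) :
    ((pvPos alphabet).get? w).getD 0 = pvIdx alphabet w := by
  unfold pvPos
  rw [posFold_get?, if_neg (by simp [PySem.Dict.contains_empty])]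
  cases h : PySem.List.index? alphabet w with
  | none => simp only [pvIdx, h]; rfl
  | some n => simp only [pvIdx, h]; simp

theorem idsGet (words alphabet : List String) (i : Int) (h0 : 0 ≤ i)
    (h1 : i < (words.length : Int)) :
    (PySem.List.pyGet? (words.map (fun w => ((pvPos alphabet).get? w).getD 0)) i).getD 0
      = gIdx words alphabet i.toNat := by
  have hk : i.toNat < words.length := by omega
  have hi : i = ((i.toNat : Nat) : Int) := by omega
  conv_lhs => rw [hi, PySem.List.pyGet?_natCast]
  simp only [gIdx]
  rw [PySem.List.pyGet?_natCast, List.getElem?_map, List.getElem?_eq_getElem hk]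
  simp [pvPos_getD]

theorem loopB (words alphabet : List String) :
    ∀ (m : Nat), m + 3 ≤ words.length →
    ((List.range m).map (fun j : Nat => (3 : Int) + j)).foldl
      (fun (st : Int × List Int) i =>
        ((st.1 - (PySem.List.pyGet? (words.map (fun w => ((pvPos alphabet).get? w).getD 0)) (i - 3)).getD 0 * ((alphabet.length : Int) * (alphabet.length : Int))) * (alphabet.length : Int) +
           (PySem.List.pyGet? (words.map (fun w => ((pvPos alphabet).get? w).getD 0)) i).getD 0,
         st.2 ++
           [(st.1 - (PySem.List.pyGet? (words.map (fun w => ((pvPos alphabet).get? w).getD 0)) (i - 3)).getD 0 * ((alphabet.length : Int) * (alphabet.length : Int))) * (alphabet.length : Int) +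
              (PySem.List.pyGet? (words.map (fun w => ((pvPos alphabet).get? w).getD 0)) i).getD 0]))
      (winH words alphabet 0, [winH words alphabet 0])
    = (winH words alphabet m, (List.range (m + 1)).map (winH words alphabet)) := by
  intro m
  induction m with
  | zero => intro _; simp
  | succ m ih =>
      intro hm
      rw [List.range_succ, List.map_append, List.foldl_append, ih (by omega)]
      simp only [List.map_cons, List.map_nil, List.foldl_cons, List.foldl_nil]
      have e3 : ((3 : Int) + m) - 3 = ((m : Nat) : Int) := by omega
      have e4 : ((3 : Int) + m) = (((m + 3 : Nat)) : Int) := by omega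
      rw [e3, idsGet words alphabet _ (by omega) (by omega),
          e4, idsGet words alphabet _ (by omega) (by omega)]
      have t1 : (((m : Nat) : Int)).toNat = m := by omega
      have t2 : ((((m + 3 : Nat)) : Int)).toNat = m + 3 := by omega
      rw [t1, t2]
      have hstep :
          (winH words alphabet m - gIdx words alphabet m * ((alphabet.length : Int) * (alphabet.length : Int))) * (alphabet.length : Int) + gIdx words alphabet (m + 3)
            = winH words alphabet (m + 1) := by
        simp only [winH]
        have e1 : m + 1 + 1 = m + 2 := rfl
        have e2 : m + 1 + 2 = m + 3 := rfl
        rw [e1, e2]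
        ring
      rw [hstep]
      rw [List.range_succ (n := m + 1), List.map_append]
      simp

theorem hash_text_alt_eq_map (words alphabet : List String) :
    hash_text_alt words alphabet =
      (List.range (words.length - 2)).map (winH words alphabet) := by
  unfold hash_text_alt
  by_cases h : words.length < 3
  · simp only [h, if_true]
    have : words.length - 2 = 0 := by omega
    rw [this]; simp
  · simp only [h, if_false]
    rw [PySem.List.pyRange_one]
    have hn : (((words.length : Int)) - 3).toNat = words.length - 3 := by omega
    rw [hn]
    rw [idsGet words alphabet 0 (by norm_num) (by omega),
        idsGet words alphabet 1 (by norm_num) (by omega),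
        idsGet words alphabet 2 (by norm_num) (by omega)]
    have hh0 :
        gIdx words alphabet ((0 : Int)).toNat * ((alphabet.length : Int) * (alphabet.length : Int)) +
          gIdx words alphabet ((1 : Int)).toNat * (alphabet.length : Int) +
          gIdx words alphabet ((2 : Int)).toNat = winH words alphabet 0 := by
      have t0 : ((0 : Int)).toNat = 0 := rfl
      have t1 : ((1 : Int)).toNat = 1 := rfl
      have t2 : ((2 : Int)).toNat = 2 := rfl
      rw [t0, t1, t2]
      simp only [winH, Nat.zero_add]
      ring
    rw [hh0]
    rw [loopB words alphabet (words.length - 3) (by omega)]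
    have : words.length - 3 + 1 = words.length - 2 := by omega
    rw [this]

-- ===== VERDICT (by name: the statement is the Claim_ definition above) =====
theorem hash_text_spec : Claim_equal_hash_text := by
  intro words alphabet _ _
  unfold Spec_hash_text
  rw [hash_text_eq_map, hash_text_alt_eq_map]
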